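-- pv_equiv track=rewrite | github.com/Generative-Logic/GL | verifier.py | _flatten_and
-- ===== SOURCE A (Python) =====
-- from typing import Dict, List, Tuple, Optional
--
-- def _flatten_and(expr: str) -> List[str]:
--     """
--     Flatten a left-nested AND expression into its ordered element list.
--
--     ``(&(&(&A B)C)D)`` → ``[A, B, C, D]``
--
--     The C++ builds ANDs as: ``current = elem[0]; for i in 1..n:
--     current = "(&" + current + elem[i] + ")"`` — so the leftmost
--     leaf is elem[0] and each successive right child is the next element.
--     """
--     elements: List[str] = []
--     while expr.startswith('(&'):
--         inner = expr[2:-1]          # strip outer "(& " and ")"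
--         # Find end of the first (left) sub-expression
--         depth = 0
--         split = -1
--         for i, c in enumerate(inner):
--             if c == '(':
--                 depth += 1
--             elif c == ')':
--                 depth -= 1
--                 if depth == 0:
--                     split = i + 1
--                     break
--         if split < 0:
--             break
--         left = inner[:split]
--         right = inner[split:]
--         elements.append(right)      # right child = next element
--         expr = left                 # recurse into left child
--     elements.append(expr)           # leftmost leaf = first element
--     elements.reverse()
--     return elements
-- ===== SOURCE B (Python) =====
-- from typing import List
--
--
-- def _flatten_and(expr: str) -> List[str]:
--     """O(L) re-implementation: one pass builds prefix paren-balances and a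
--     first-matching-close table; the peel loop then jumps via the table instead
--     of rescanning, and the result is assembled leaf-first without reversal of
--     the whole list structure A builds."""
--     n = len(expr)
--     # prefix balances: bal[i] = (# of '(' minus # of ')') in expr[:i]
--     bal = [0]
--     for c in expr:
--         bal.append(bal[-1] + (1 if c == '(' else -1 if c == ')' else 0))
--     # first_close[i] = smallest j >= i with expr[j] == ')' and bal[j+1] == bal[i], else -1
--     last = [-1] * (2 * n + 1)        # indexed by balance + n
--     first_close = [-1] * (n + 1)
--     for i in range(n - 1, -1, -1):
--         if expr[i] == ')':
--             last[bal[i + 1] + n] = i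
--         first_close[i] = last[bal[i] + n]
--     # peel the left-nested ANDs, tracking a window [lo, hi) of expr
--     rights: List[str] = []
--     lo, hi = 0, n
--     while hi - lo >= 2 and expr[lo] == '(' and expr[lo + 1] == '&':
--         il = lo + 2
--         ih = max(hi - 1, il)
--         j = first_close[il]
--         if j < 0 or j >= ih:
--             break
--         rights.append(expr[j + 1:ih])
--         lo, hi = il, j + 1
--     return [expr[lo:hi]] + rights[::-1]
-- ===== Notes on version B (the rewrite author's own statement) =====
-- stated objective: alternative
-- what changed: Instead of rescanning and reslicing the shrinking expression at every nesting level (quadratic in deeply nested ANDs), B precomputes prefix paren-balances and a first-matching-close table in two linear passes and peels the nested ANDs by jumping through an index window [lo, hi) over the original string via that table; total work is O(L) on every input, but B pays the O(L) preprocessing even where A exits immediately, so it is not measurably faster on generic inputs.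
import Mathlib
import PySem

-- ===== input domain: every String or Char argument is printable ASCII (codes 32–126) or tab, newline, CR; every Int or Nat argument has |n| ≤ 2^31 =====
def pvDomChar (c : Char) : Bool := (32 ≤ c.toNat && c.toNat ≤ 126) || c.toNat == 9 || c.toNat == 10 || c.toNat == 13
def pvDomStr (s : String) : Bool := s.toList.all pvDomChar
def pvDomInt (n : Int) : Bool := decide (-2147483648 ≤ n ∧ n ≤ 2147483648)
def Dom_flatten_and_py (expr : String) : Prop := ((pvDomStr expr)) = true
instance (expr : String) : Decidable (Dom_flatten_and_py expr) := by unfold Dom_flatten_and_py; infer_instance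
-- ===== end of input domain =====

-- B replaces A's per-level rescans and reslicing with one precomputed
-- first-matching-close table and an index-window peel loop over the original string.

-- ===== PORT A =====
-- the inner for-loop of A: scan for the first ')' that brings the depth back to 0
def pvFindSplitGo : List Char → Int → Int → Int
  | [], _, _ => -1
  | c :: rest, i, depth =>
    if c = '(' then pvFindSplitGo rest (i + 1) (depth + 1)
    else if c = ')' then
      if depth - 1 = 0 then i + 1 else pvFindSplitGo rest (i + 1) (depth - 1)
    else pvFindSplitGo rest (i + 1) depth

-- A's while-loop; the fuel (length+1) strictly exceeds the possible iteration count.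
-- expr[2:-1] is exactly (expr.drop 2).dropLast; expr[:split]/expr[split:] are take/drop (split ≥ 0 here).
def pvALoop : Nat → List Char → List (List Char) → List Char × List (List Char)
  | 0, expr, els => (expr, els)
  | fuel + 1, expr, els =>
    if expr.take 2 = ['(', '&'] then
      let inner := (expr.drop 2).dropLast
      let split := pvFindSplitGo inner 0 0
      if split < 0 then (expr, els)
      else pvALoop fuel (inner.take split.toNat) (els ++ [inner.drop split.toNat])
    else (expr, els)

def flatten_and_py (expr : String) : List String :=
  let r := pvALoop (expr.toList.length + 1) expr.toList []
  ((r.2 ++ [r.1]).reverse).map String.ofList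

-- ===== PORT B =====
def pvDelta (c : Char) : Int := if c = '(' then 1 else if c = ')' then -1 else 0

-- bal = [0]; for c in expr: bal.append(bal[-1] + delta(c))
def pvMkBal (cs : List Char) : List Int :=
  cs.foldl (fun a c => a ++ [a.getLast! + pvDelta c]) [0]

-- for i in range(n-1, -1, -1): ... (the countdown parameter k processes index i = k-1)
def pvFcGo (cs : List Char) (bal : List Int) (n : Nat) : Nat → List Int → List Int → List Int
  | 0, _last, fc => fc
  | k + 1, last, fc =>
    let last' := if cs.getD k ' ' = ')' then last.set (bal.getD (k + 1) 0 + n).toNat (k : Int) else last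
    pvFcGo cs bal n k last' (fc.set k (last'.getD (bal.getD k 0 + n).toNat (-1)))

-- B's peel loop over an index window [lo, hi); the fuel (n+1) strictly exceeds the iteration count
def pvBLoop (cs : List Char) (fc : List Int) : Nat → Nat → Nat → List (List Char) → Nat × Nat × List (List Char)
  | 0, lo, hi, rights => (lo, hi, rights)
  | fuel + 1, lo, hi, rights =>
    if 2 ≤ hi - lo ∧ cs.getD lo ' ' = '(' ∧ cs.getD (lo + 1) ' ' = '&' then
      let il := lo + 2
      let ih := max (hi - 1) il
      let j := fc.getD il (-1)
      if j < 0 ∨ (ih : Int) ≤ j then (lo, hi, rights)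
      else pvBLoop cs fc fuel il (j.toNat + 1) (rights ++ [(cs.take ih).drop (j.toNat + 1)])
    else (lo, hi, rights)

def flatten_and_py_alt (expr : String) : List String :=
  let cs := expr.toList
  let n := cs.length
  let bal := pvMkBal cs
  let fc := pvFcGo cs bal n n (List.replicate (2 * n + 1) (-1)) (List.replicate (n + 1) (-1))
  let r := pvBLoop cs fc (n + 1) 0 n []
  String.ofList ((cs.take r.2.1).drop r.1) :: (r.2.2.reverse.map String.ofList)

-- ===== PRECONDITION & SPEC =====
def Spec_flatten_and_py (expr : String) (out : List String) : Prop := out = flatten_and_py_alt expr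
instance (expr : String) (out : List String) : Decidable (Spec_flatten_and_py expr out) := by unfold Spec_flatten_and_py; infer_instance

-- ===== CLAIM (what is proved, stated in full; the proofs are below) =====
def Claim_equal_flatten_and_py : Prop := ∀ (expr : String), Dom_flatten_and_py expr → Spec_flatten_and_py expr (flatten_and_py expr)

-- ===== LEMMAS AND PROOFS =====

-- prefix paren-balance of the first i characters
def pvBal (cs : List Char) (i : Nat) : Int := ((cs.take i).map pvDelta).sum

theorem pvBal_succ (cs : List Char) (i : Nat) (h : i < cs.length) :
    pvBal cs (i + 1) = pvBal cs i + pvDelta (cs.getD i ' ') := by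
  unfold pvBal
  simp only [List.map_take]
  rw [List.sum_take_succ _ i (by simpa using h)]
  simp [List.getD_eq_getElem?_getD, List.getElem?_eq_getElem h]

theorem pvBal_bounds (cs : List Char) (i : Nat) : -(i : Int) ≤ pvBal cs i ∧ pvBal cs i ≤ i := by
  induction i with
  | zero => simp [pvBal]
  | succ k ih =>
    by_cases h : k < cs.length
    · rw [pvBal_succ cs k h]
      have : -1 ≤ pvDelta (cs.getD k ' ') ∧ pvDelta (cs.getD k ' ') ≤ 1 := by
        unfold pvDelta; split_ifs <;> omega
      push_cast; omega
    · have heq : cs.take (k+1) = cs.take k := by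
        rw [List.take_of_length_le (by omega), List.take_of_length_le (by omega)]
      unfold pvBal; rw [heq]; unfold pvBal at ih; push_cast; omega

def pvBalsFrom (b : Int) : List Char → List Int
  | [] => []
  | c :: r => (b + pvDelta c) :: pvBalsFrom (b + pvDelta c) r

theorem pvFoldl_bal (l : List Char) : ∀ (acc : List Int) (b : Int), acc.getLast? = some b →
    l.foldl (fun a c => a ++ [a.getLast! + pvDelta c]) acc = acc ++ pvBalsFrom b l := by
  induction l with
  | nil => intro acc b _; simp [pvBalsFrom]
  | cons c r ih =>
    intro acc b hb
    have hlast : acc.getLast! = b := by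
      cases acc with
      | nil => simp at hb
      | cons x xs => simp [List.getLast!, List.getLast?_eq_some_getLast] at hb ⊢; simp [hb]
    simp only [List.foldl_cons, hlast]
    rw [ih (acc ++ [b + pvDelta c]) (b + pvDelta c) (by simp)]
    simp [pvBalsFrom]

theorem pvBalsFrom_getD (cs : List Char) : ∀ (k p : Nat), p + k < cs.length →
    (pvBalsFrom (pvBal cs p) (cs.drop p)).getD k 0 = pvBal cs (p + k + 1) := by
  intro k
  induction k with
  | zero =>
    intro p hp
    simp only [Nat.add_zero] at hp ⊢
    rw [List.drop_eq_getElem_cons hp]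
    simp only [pvBalsFrom, List.getD_cons_zero]
    rw [pvBal_succ cs p hp]
    congr 1
    simp [List.getD_eq_getElem?_getD, List.getElem?_eq_getElem hp]
  | succ k ih =>
    intro p hp
    have hp' : p < cs.length := by omega
    rw [List.drop_eq_getElem_cons hp']
    simp only [pvBalsFrom]
    have hstep : pvBal cs p + pvDelta cs[p] = pvBal cs (p + 1) := by
      rw [pvBal_succ cs p hp']
      simp [List.getD_eq_getElem?_getD, List.getElem?_eq_getElem hp']
    rw [List.getD_cons_succ, hstep]
    have := ih (p + 1) (by omega)
    rw [this]
    ring_nf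

theorem pvMkBal_getD (cs : List Char) (i : Nat) (h : i ≤ cs.length) :
    (pvMkBal cs).getD i 0 = pvBal cs i := by
  unfold pvMkBal
  rw [pvFoldl_bal cs [0] 0 (by simp)]
  cases i with
  | zero => simp [pvBal]
  | succ k =>
    have : ([(0:Int)] ++ pvBalsFrom 0 cs).getD (k+1) 0 = (pvBalsFrom 0 cs).getD k 0 := by simp
    rw [this]
    have h0 : pvBal cs 0 = 0 := by simp [pvBal]
    have := pvBalsFrom_getD cs k 0 (by omega)
    simpa [h0] using this

-- first j ≥ k with cs[j] = ')' and balance (j+1) = b, else -1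
def pvFqFrom (cs : List Char) (k : Nat) (b : Int) : Int :=
  if h : k < cs.length then
    if cs.getD k ' ' = ')' ∧ pvBal cs (k + 1) = b then (k : Int) else pvFqFrom cs (k + 1) b
  else -1
termination_by cs.length - k

theorem pvFqFrom_ge (cs : List Char) (k : Nat) (b : Int) (h : 0 ≤ pvFqFrom cs k b) :
    (k : Int) ≤ pvFqFrom cs k b := by
  revert h
  induction k using pvFqFrom.induct cs b with
  | case1 k hk hq => intro h; rw [pvFqFrom, dif_pos hk, if_pos hq]
  | case2 k hk hq ih =>
    intro h
    rw [pvFqFrom] at h ⊢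
    simp only [hk, dif_pos, if_neg hq] at h ⊢
    have := ih h
    omega
  | case3 k hk => intro h; rw [pvFqFrom] at h; simp [hk] at h

-- relative position of the first split point of a scanned list, given entry depth d
def pvScanSpec : List Char → Int → Option Nat
  | [], _ => none
  | c :: rest, d =>
    if c = ')' ∧ d + pvDelta c = 0 then some 0
    else (pvScanSpec rest (d + pvDelta c)).map (· + 1)

theorem pvFindSplitGo_spec (l : List Char) : ∀ (i d : Int),
    pvFindSplitGo l i d = match pvScanSpec l d with
      | some k => i + k + 1
      | none => -1 := by
  induction l with
  | nil => intro i d; simp [pvFindSplitGo, pvScanSpec]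
  | cons c rest ih =>
    intro i d
    by_cases hc : c = '('
    · subst hc
      have e1 : pvFindSplitGo ('(' :: rest) i d = pvFindSplitGo rest (i + 1) (d + 1) := by
        simp [pvFindSplitGo]
      have e2 : pvScanSpec ('(' :: rest) d = (pvScanSpec rest (d + 1)).map (· + 1) := by
        have : pvDelta '(' = 1 := by decide
        simp [pvScanSpec, this]
      rw [e1, e2, ih (i + 1) (d + 1)]
      cases h : pvScanSpec rest (d + 1) <;> simp [h] <;> ring
    · by_cases hc2 : c = ')'
      · subst hc2
        have e1 : pvFindSplitGo (')' :: rest) i d =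
            if d - 1 = 0 then i + 1 else pvFindSplitGo rest (i + 1) (d - 1) := by
          simp [pvFindSplitGo]
        have e2 : pvScanSpec (')' :: rest) d =
            if d - 1 = 0 then some 0 else (pvScanSpec rest (d - 1)).map (· + 1) := by
          have hd : pvDelta ')' = -1 := by decide
          simp only [pvScanSpec, hd]
          by_cases hz : d - 1 = 0
          · rw [if_pos hz, if_pos ⟨trivial, by omega⟩]
          · rw [if_neg hz, if_neg (by intro ⟨_, h2⟩; omega)]
            have hdd : d + -1 = d - 1 := by ring
            rw [hdd]
        rw [e1, e2]
        by_cases hz : d - 1 = 0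
        · simp [hz]
        · rw [if_neg hz, if_neg hz, ih (i + 1) (d - 1)]
          cases h : pvScanSpec rest (d - 1) <;> simp [h] <;> ring
      · have hd : pvDelta c = 0 := by simp [pvDelta, hc, hc2]
        have e1 : pvFindSplitGo (c :: rest) i d = pvFindSplitGo rest (i + 1) d := by
          simp [pvFindSplitGo, hc, hc2]
        have e2 : pvScanSpec (c :: rest) d = (pvScanSpec rest d).map (· + 1) := by
          simp [pvScanSpec, hd, hc2]
        rw [e1, e2, ih (i + 1) d]
        cases h : pvScanSpec rest d <;> simp [h] <;> ring

theorem pvScanSpec_window (cs : List Char) : ∀ (m il : Nat) (b : Int), il + m ≤ cs.length →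
    pvScanSpec ((cs.take (il + m)).drop il) (pvBal cs il - b) =
      (if 0 ≤ pvFqFrom cs il b ∧ pvFqFrom cs il b < ((il : Int) + m) then
        some ((pvFqFrom cs il b).toNat - il) else none) := by
  intro m
  induction m with
  | zero =>
    intro il b h
    have hwin : (cs.take (il + 0)).drop il = [] := by simp
    rw [hwin]
    have := pvFqFrom_ge cs il b
    simp only [pvScanSpec]
    split_ifs with hif
    · exfalso; have := this hif.1; omega
    · rfl
  | succ m ih =>
    intro il b h
    have hil : il < cs.length := by omega
    have hget : cs.getD il ' ' = cs[il] := by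
      simp [List.getD_eq_getElem?_getD, List.getElem?_eq_getElem hil]
    have hlen : il < (cs.take (il + 1 + m)).length := by
      simp; omega
    have hwin : (cs.take (il + (m + 1))).drop il
        = cs[il] :: (cs.take (il + 1 + m)).drop (il + 1) := by
      rw [show il + (m + 1) = il + 1 + m by omega]
      rw [List.drop_eq_getElem_cons hlen]
      congr 1
      simp
    rw [hwin]
    have hbal : pvBal cs (il + 1) = pvBal cs il + pvDelta cs[il] := by
      rw [pvBal_succ cs il hil, hget]
    by_cases hcond : cs.getD il ' ' = ')' ∧ pvBal cs (il + 1) = b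
    · have hfq : pvFqFrom cs il b = (il : Int) := by
        rw [pvFqFrom, dif_pos hil, if_pos hcond]
      have hhead : cs[il] = ')' ∧ (pvBal cs il - b) + pvDelta cs[il] = 0 := by
        refine ⟨by rw [← hget]; exact hcond.1, ?_⟩
        have := hcond.2
        omega
      simp only [pvScanSpec, if_pos hhead, hfq]
      rw [if_pos ⟨by omega, by push_cast; omega⟩]
      simp
    · have hfq : pvFqFrom cs il b = pvFqFrom cs (il + 1) b := by
        rw [pvFqFrom, dif_pos hil, if_neg hcond]
      have hhead : ¬(cs[il] = ')' ∧ (pvBal cs il - b) + pvDelta cs[il] = 0) := by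
        intro ⟨h1, h2⟩
        exact hcond ⟨by rw [hget, h1], by omega⟩
      simp only [pvScanSpec, if_neg hhead]
      have harg : pvBal cs il - b + pvDelta cs[il] = pvBal cs (il + 1) - b := by omega
      rw [harg, ih (il + 1) b (by omega)]
      have hge := pvFqFrom_ge cs (il + 1) b
      rw [hfq]
      push_cast
      by_cases hin : 0 ≤ pvFqFrom cs (il + 1) b ∧ pvFqFrom cs (il + 1) b < ((il : Int) + 1 + m)
      · rw [if_pos hin, if_pos ⟨hin.1, by omega⟩]
        have hge' := hge hin.1
        simp only [Option.map_some]
        congr 1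
        omega
      · rw [if_neg hin, if_neg (by intro hx; exact hin ⟨hx.1, by omega⟩)]
        simp

theorem pvFcGo_spec (cs : List Char) (bal : List Int)
    (hbal : ∀ i ≤ cs.length, bal.getD i 0 = pvBal cs i) :
    ∀ (k : Nat) (last fc : List Int),
    k ≤ cs.length →
    last.length = 2 * cs.length + 1 →
    fc.length = cs.length + 1 →
    (∀ b : Int, -(cs.length : Int) ≤ b → b ≤ (cs.length : Int) →
      last.getD (b + cs.length).toNat (-1) = pvFqFrom cs k b) →
    (∀ i, k ≤ i → i ≤ cs.length → fc.getD i (-1) = pvFqFrom cs i (pvBal cs i)) →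
    ∀ i ≤ cs.length, (pvFcGo cs bal cs.length k last fc).getD i (-1) = pvFqFrom cs i (pvBal cs i) := by
  intro k
  induction k with
  | zero =>
    intro last fc _ _ _ _ hfc i hi
    exact hfc i (Nat.zero_le i) hi
  | succ k ih =>
    intro last fc hk hlastlen hfclen hlast hfc i hi
    simp only [pvFcGo]
    set last' := if cs.getD k ' ' = ')' then last.set (bal.getD (k + 1) 0 + cs.length).toNat (k : Int) else last with hlast'def
    have hkn : k < cs.length := by omega
    have hbalk1 : bal.getD (k + 1) 0 = pvBal cs (k + 1) := hbal (k + 1) (by omega)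
    have hbalk : bal.getD k 0 = pvBal cs k := hbal k (by omega)
    have hbnd1 := pvBal_bounds cs (k + 1)
    have hbnd0 := pvBal_bounds cs k
    have hlast'len : last'.length = 2 * cs.length + 1 := by
      rw [hlast'def]; split_ifs <;> simp [hlastlen]
    -- the updated `last` satisfies the invariant one index earlier
    have hlast' : ∀ b : Int, -(cs.length : Int) ≤ b → b ≤ (cs.length : Int) →
        last'.getD (b + cs.length).toNat (-1) = pvFqFrom cs k b := by
      intro b hb1 hb2
      rw [pvFqFrom, dif_pos hkn]
      by_cases hcl : cs.getD k ' ' = ')'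
      · rw [hlast'def, if_pos hcl, hbalk1]
        by_cases hbeq : pvBal cs (k + 1) = b
        · rw [if_pos ⟨hcl, hbeq⟩, hbeq]
          have hidx : (b + (cs.length : Int)).toNat < last.length := by rw [hlastlen]; omega
          simp [List.getD_eq_getElem?_getD, List.getElem?_set_self, hidx]
        · rw [if_neg (by intro hx; exact hbeq hx.2)]
          have hne : (pvBal cs (k + 1) + (cs.length : Int)).toNat ≠ (b + (cs.length : Int)).toNat := by
            omega
          rw [show ((k : Int)) = ((k : Int)) from rfl]
          have := List.getElem?_set_ne (l := last) (a := ((k : Nat) : Int)) hne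
          simp only [List.getD_eq_getElem?_getD, this]
          have := hlast b hb1 hb2
          simpa [List.getD_eq_getElem?_getD] using this
      · rw [hlast'def, if_neg hcl, if_neg (by intro hx; exact hcl hx.1)]
        exact hlast b hb1 hb2
    have hv : (fc.set k (last'.getD (bal.getD k 0 + cs.length).toNat (-1))).getD k (-1)
        = pvFqFrom cs k (pvBal cs k) := by
      have hidx : k < fc.length := by omega
      rw [hbalk]
      simp [List.getD_eq_getElem?_getD, List.getElem?_set_self, hidx]
      have := hlast' (pvBal cs k) (by omega) (by omega)
      simpa [List.getD_eq_getElem?_getD] using this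
    refine ih last' (fc.set k _) (by omega) hlast'len (by simp [hfclen]) hlast' ?_ i hi
    intro i' hi1 hi2
    by_cases hik : i' = k
    · subst hik
      exact hv
    · have hne : k ≠ i' := fun hx => hik hx.symm
      rw [List.getD_eq_getElem?_getD, List.getElem?_set_ne hne, ← List.getD_eq_getElem?_getD]
      exact hfc i' (by omega) hi2

theorem pvALoop_acc : ∀ (fuel : Nat) (expr : List Char) (els : List (List Char)),
    pvALoop fuel expr els = ((pvALoop fuel expr []).1, els ++ (pvALoop fuel expr []).2) := by
  intro fuel
  induction fuel with
  | zero => intro expr els; simp [pvALoop]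
  | succ fuel ih =>
    intro expr els
    simp only [pvALoop]
    split_ifs with h1 h2
    · simp
    · rw [ih _ (els ++ _), ih _ ([] ++ _)]
      simp
    · simp

theorem pvBLoop_acc (cs : List Char) (fc : List Int) : ∀ (fuel lo hi : Nat) (rights : List (List Char)),
    pvBLoop cs fc fuel lo hi rights =
      ((pvBLoop cs fc fuel lo hi []).1, (pvBLoop cs fc fuel lo hi []).2.1,
        rights ++ (pvBLoop cs fc fuel lo hi []).2.2) := by
  intro fuel
  induction fuel with
  | zero => intro lo hi rights; simp [pvBLoop]
  | succ fuel ih =>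
    intro lo hi rights
    simp only [pvBLoop]
    split_ifs with h1 h2
    · simp
    · rw [ih _ _ (rights ++ _), ih _ _ ([] ++ _)]
      simp
    · simp

theorem pvLockstep (cs : List Char) (fc : List Int)
    (hfc : ∀ i ≤ cs.length, fc.getD i (-1) = pvFqFrom cs i (pvBal cs i)) :
    ∀ (fuel lo hi : Nat), lo ≤ hi → hi ≤ cs.length →
      pvALoop fuel ((cs.take hi).drop lo) [] =
        (((cs.take (pvBLoop cs fc fuel lo hi []).2.1).drop (pvBLoop cs fc fuel lo hi []).1),
          (pvBLoop cs fc fuel lo hi []).2.2) := by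
  intro fuel
  induction fuel with
  | zero => intro lo hi _ _; simp [pvALoop, pvBLoop]
  | succ fuel ih =>
    intro lo hi hlohi hhin
    have hdec : ∀ (_ : 2 ≤ hi - lo), ((cs.take hi).drop lo).take 2
        = [cs.getD lo ' ', cs.getD (lo + 1) ' '] := by
      intro h2
      have hlo : lo < (cs.take hi).length := by simp; omega
      have hlo1 : lo + 1 < (cs.take hi).length := by simp; omega
      rw [List.drop_eq_getElem_cons hlo, List.drop_eq_getElem_cons hlo1]
      have g0 : (cs.take hi)[lo] = cs.getD lo ' ' := by
        simp [List.getD_eq_getElem?_getD, List.getElem?_eq_getElem (show lo < cs.length by omega)]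
      have g1 : (cs.take hi)[lo + 1] = cs.getD (lo + 1) ' ' := by
        simp [List.getD_eq_getElem?_getD, List.getElem?_eq_getElem (show lo + 1 < cs.length by omega)]
      simp [g0, g1]
    simp only [pvALoop, pvBLoop]
    by_cases hcond : 2 ≤ hi - lo ∧ cs.getD lo ' ' = '(' ∧ cs.getD (lo + 1) ' ' = '&'
    · obtain ⟨h2, hc1, hc2⟩ := hcond
      have hAcond : ((cs.take hi).drop lo).take 2 = ['(', '&'] := by
        rw [hdec h2, hc1, hc2]
      have hBcond : 2 ≤ hi - lo ∧ cs.getD lo ' ' = '(' ∧ cs.getD (lo + 1) ' ' = '&' := ⟨h2, hc1, hc2⟩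
      rw [if_pos hAcond, if_pos hBcond]
      set il := lo + 2 with hil
      set ihv := max (hi - 1) il with hih
      set j := fc.getD il (-1) with hjdef
      have hil2 : il ≤ hi := by omega
      have hihle : ihv ≤ cs.length := by omega
      have hilih : il ≤ ihv := by omega
      have hinner : (((cs.take hi).drop lo).drop 2).dropLast = (cs.take ihv).drop il := by
        rw [List.drop_drop]
        by_cases h3 : lo + 3 ≤ hi
        · have hihval : ihv = hi - 1 := by omega
          rw [List.dropLast_eq_take]
          have hwl : ((cs.take hi).drop (lo + 2)).length = hi - (lo + 2) := by simp; omega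
          rw [hwl, List.take_drop]
          rw [hihval]
          congr 1
          rw [List.take_take]
          congr 1
          omega
        · have e1 : (cs.take hi).drop (lo + 2) = [] := by
            apply List.drop_eq_nil_of_le; simp; omega
          have e2 : (cs.take ihv).drop il = [] := by
            apply List.drop_eq_nil_of_le; simp; omega
          rw [e1, e2]; rfl
      have hfq : j = pvFqFrom cs il (pvBal cs il) := hfc il (by omega)
      have hsplit : pvFindSplitGo ((cs.take ihv).drop il) 0 0 =
          (if 0 ≤ j ∧ j < (ihv : Int) then (((j.toNat - il : Nat)) : Int) + 1 else -1) := by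
        rw [pvFindSplitGo_spec]
        have hw := pvScanSpec_window cs (ihv - il) il (pvBal cs il) (by omega)
        rw [show il + (ihv - il) = ihv by omega, sub_self] at hw
        rw [hw, ← hfq]
        have hcast : ((il : Int) + ((ihv - il : Nat) : Int)) = (ihv : Int) := by push_cast; omega
        rw [hcast]
        split_ifs with hjc
        · simp
        · rfl
      rw [hinner, hsplit]
      by_cases hj : 0 ≤ j ∧ j < (ihv : Int)
      · have hjge : (il : Int) ≤ j := by
          rw [hfq]; exact pvFqFrom_ge cs il _ (by rw [← hfq]; exact hj.1)
        have hj0 := hj.1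
        have hj1 := hj.2
        rw [if_pos hj, if_neg (show ¬((((j.toNat - il : Nat)) : Int) + 1 < 0) by omega),
          if_neg (show ¬(j < 0 ∨ (ihv : Int) ≤ j) by omega)]
        have htn : ((((j.toNat - il : Nat)) : Int) + 1).toNat = j.toNat - il + 1 := by omega
        rw [htn]
        have hjih : j.toNat + 1 ≤ ihv := by omega
        have hleft : ((cs.take ihv).drop il).take (j.toNat - il + 1) = (cs.take (j.toNat + 1)).drop il := by
          rw [List.take_drop, List.take_take]
          congr 2
          omega
        have hright : ((cs.take ihv).drop il).drop (j.toNat - il + 1) = (cs.take ihv).drop (j.toNat + 1) := by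
          rw [List.drop_drop]
          congr 1
          omega
        rw [hleft, hright, pvALoop_acc, pvBLoop_acc cs fc fuel il (j.toNat + 1),
          ih il (j.toNat + 1) (by omega) (by omega)]
      · rw [if_neg hj, if_pos (show (j < 0 ∨ (ihv : Int) ≤ j) by omega),
          if_pos (show (-1 : Int) < 0 by norm_num)]
    · have hAcond : ¬(((cs.take hi).drop lo).take 2 = ['(', '&']) := by
        by_cases h2 : 2 ≤ hi - lo
        · rw [hdec h2]
          intro hx
          injection hx with hx1 hx2
          injection hx2 with hx2 _
          exact hcond ⟨h2, hx1, hx2⟩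
        · intro hx
          have hlx : (((cs.take hi).drop lo).take 2).length = 2 := by rw [hx]; rfl
          simp at hlx
          omega
      rw [if_neg hAcond, if_neg hcond]

-- ===== VERDICT (by name: the statement is the Claim_ definition above) =====
theorem flatten_and_py_spec : Claim_equal_flatten_and_py := by
  unfold Claim_equal_flatten_and_py
  intro expr _
  unfold Spec_flatten_and_py flatten_and_py flatten_and_py_alt
  have hbal : ∀ i ≤ expr.toList.length, (pvMkBal expr.toList).getD i 0 = pvBal expr.toList i :=
    fun i hi => pvMkBal_getD expr.toList i hi
  have hlast0 : ∀ b : Int, -(expr.toList.length : Int) ≤ b → b ≤ (expr.toList.length : Int) →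
      (List.replicate (2 * expr.toList.length + 1) (-1 : Int)).getD
        (b + expr.toList.length).toNat (-1) = pvFqFrom expr.toList expr.toList.length b := by
    intro b _ _
    rw [pvFqFrom, dif_neg (by omega)]
    simp [List.getD_eq_getElem?_getD, List.getElem?_replicate]
    split_ifs <;> rfl
  have hfc0 : ∀ i, expr.toList.length ≤ i → i ≤ expr.toList.length →
      (List.replicate (expr.toList.length + 1) (-1 : Int)).getD i (-1)
        = pvFqFrom expr.toList i (pvBal expr.toList i) := by
    intro i h1 h2
    have : i = expr.toList.length := by omega
    subst this
    rw [pvFqFrom, dif_neg (by omega)]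
    simp [List.getD_eq_getElem?_getD, List.getElem?_replicate]
  have hfc := pvFcGo_spec expr.toList (pvMkBal expr.toList) hbal expr.toList.length
    (List.replicate (2 * expr.toList.length + 1) (-1))
    (List.replicate (expr.toList.length + 1) (-1))
    (le_refl _) (by simp) (by simp) hlast0 hfc0
  have hls := pvLockstep expr.toList _ hfc (expr.toList.length + 1) 0 expr.toList.length
    (Nat.zero_le _) (le_refl _)
  rw [show (expr.toList.take expr.toList.length).drop 0 = expr.toList by simp] at hls
  rw [hls]
  simp
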